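-- pv_equiv track=rewrite | github.com/horimpark/code-playground | codewars/6kyu/Diamonds and Toads.py | diamonds_and_toads
-- ===== SOURCE A (Python) =====
-- def diamonds_and_toads(sentence, fairy):
--     if fairy == 'good':
--         result = {"ruby": 0, "crystal": 0}
--         for c in sentence:
--             if c == 'r':
--                 result["ruby"] += 1
--             elif c == "R":
--                 result["ruby"] += 2
--             elif c == 'c':
--                 result["crystal"] += 1
--             elif c == "C":
--                 result["crystal"] += 2
--         return result
--     elif fairy == 'evil':
--         result = {"python": 0, "squirrel": 0}
--         for c in sentence:
--             if c == 'p':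
--                 result["python"] += 1
--             elif c == "P":
--                 result["python"] += 2
--             elif c == 's':
--                 result["squirrel"] += 1
--             elif c == "S":
--                 result["squirrel"] += 2
--         return result
--
--     return None
-- ===== SOURCE B (Python) =====
-- def diamonds_and_toads(sentence, fairy):
--     if fairy == 'good':
--         return {"ruby": sentence.count('r') + 2 * sentence.count('R'),
--                 "crystal": sentence.count('c') + 2 * sentence.count('C')}
--     if fairy == 'evil':
--         return {"python": sentence.count('p') + 2 * sentence.count('P'),
--                 "squirrel": sentence.count('s') + 2 * sentence.count('S')}
--     return None
-- ===== Notes on version B (the rewrite author's own statement) =====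
-- stated objective: simpler
-- what changed: Replaces the single branching per-character loop that updates a mutable dict with direct construction of the result dict from four str.count scans (weighted totals computed as count(lower) + 2*count(upper)).
import Mathlib
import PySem

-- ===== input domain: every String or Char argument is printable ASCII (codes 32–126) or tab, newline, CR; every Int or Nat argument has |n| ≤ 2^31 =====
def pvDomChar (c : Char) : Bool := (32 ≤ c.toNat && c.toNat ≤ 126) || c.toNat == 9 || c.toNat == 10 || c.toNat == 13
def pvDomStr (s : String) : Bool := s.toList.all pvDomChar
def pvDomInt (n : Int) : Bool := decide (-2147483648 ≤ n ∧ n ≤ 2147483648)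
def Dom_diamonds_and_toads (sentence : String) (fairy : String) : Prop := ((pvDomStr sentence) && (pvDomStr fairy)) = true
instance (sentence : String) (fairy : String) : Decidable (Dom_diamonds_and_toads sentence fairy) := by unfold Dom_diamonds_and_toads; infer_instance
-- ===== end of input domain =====

-- B replaces A's single branching per-character loop over a mutable dict with four direct
-- str.count scans (weighted as count(lower) + 2*count(upper)); simpler, same O(n) cost.


-- ===== PORT A =====
-- the body of A's 'good' loop: the if/elif chain updating result
def stepGood (d : PySem.Dict String Int) (c : Char) : PySem.Dict String Int :=
  if c == 'r' then d.modify "ruby" 0 (· + 1)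
  else if c == 'R' then d.modify "ruby" 0 (· + 2)
  else if c == 'c' then d.modify "crystal" 0 (· + 1)
  else if c == 'C' then d.modify "crystal" 0 (· + 2)
  else d

-- the body of A's 'evil' loop
def stepEvil (d : PySem.Dict String Int) (c : Char) : PySem.Dict String Int :=
  if c == 'p' then d.modify "python" 0 (· + 1)
  else if c == 'P' then d.modify "python" 0 (· + 2)
  else if c == 's' then d.modify "squirrel" 0 (· + 1)
  else if c == 'S' then d.modify "squirrel" 0 (· + 2)
  else d

def diamonds_and_toads (sentence : String) (fairy : String) : Option (List (String × Int)) :=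
  if fairy == "good" then
    let result : PySem.Dict String Int := PySem.Dict.ofList [("ruby", 0), ("crystal", 0)]
    some ((sentence.toList.foldl stepGood result).items)
  else if fairy == "evil" then
    let result : PySem.Dict String Int := PySem.Dict.ofList [("python", 0), ("squirrel", 0)]
    some ((sentence.toList.foldl stepEvil result).items)
  else none

-- ===== PORT B =====
def diamonds_and_toads_alt (sentence : String) (fairy : String) : Option (List (String × Int)) :=
  if fairy == "good" then
    some [("ruby", (PySem.Str.count sentence "r" : Int) + 2 * (PySem.Str.count sentence "R" : Int)),
          ("crystal", (PySem.Str.count sentence "c" : Int) + 2 * (PySem.Str.count sentence "C" : Int))]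
  else if fairy == "evil" then
    some [("python", (PySem.Str.count sentence "p" : Int) + 2 * (PySem.Str.count sentence "P" : Int)),
          ("squirrel", (PySem.Str.count sentence "s" : Int) + 2 * (PySem.Str.count sentence "S" : Int))]
  else none

-- ===== PRECONDITION & SPEC =====
def Spec_diamonds_and_toads (sentence : String) (fairy : String) (out : Option (List (String × Int))) : Prop := out = diamonds_and_toads_alt sentence fairy
instance (sentence : String) (fairy : String) (out : Option (List (String × Int))) : Decidable (Spec_diamonds_and_toads sentence fairy out) := by unfold Spec_diamonds_and_toads; infer_instance

-- ===== CLAIM (what is proved, stated in full; the proofs are below) =====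
def Claim_equal_diamonds_and_toads : Prop := ∀ (sentence : String) (fairy : String), Dom_diamonds_and_toads sentence fairy → Spec_diamonds_and_toads sentence fairy (diamonds_and_toads sentence fairy)

-- ===== LEMMAS AND PROOFS =====

-- Python str.count of a single character equals List.count
theorem count_go_single (c : Char) : ∀ (l : List Char) (acc : Nat),
    PySem.Chars.count.go [c] l.length l acc = acc + l.count c := by
  intro l
  induction l with
  | nil => intro acc; simp [PySem.Chars.count.go]
  | cons h t ih =>
    intro acc
    rw [List.length_cons, PySem.Chars.count.go]
    by_cases hc : h = c
    · simp [hc, List.isPrefixOf, ih, List.count_cons]; omega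
    · simp [List.isPrefixOf, Ne.symm hc, hc, ih, List.count_cons]

theorem count_single (s : List Char) (c : Char) :
    PySem.Chars.count s [c] = s.count c := by
  simp [PySem.Chars.count, count_go_single]

theorem good_loop (l : List Char) (a b : Int) :
    l.foldl stepGood (PySem.Dict.mk [("ruby", a), ("crystal", b)]) =
      PySem.Dict.mk [("ruby", a + l.count 'r' + 2 * l.count 'R'),
                     ("crystal", b + l.count 'c' + 2 * l.count 'C')] := by
  induction l generalizing a b with
  | nil => simp
  | cons h t ih =>
    by_cases h1 : h = 'r'
    · simp [h1, stepGood, PySem.Dict.modify, PySem.Dict.contains, PySem.Dict.insert, PySem.Dict.getD, PySem.Dict.get?, ih, List.count_cons]; omega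
    · by_cases h2 : h = 'R'
      · simp [h1, h2, stepGood, PySem.Dict.modify, PySem.Dict.contains, PySem.Dict.insert, PySem.Dict.getD, PySem.Dict.get?, ih, List.count_cons]; omega
      · by_cases h3 : h = 'c'
        · simp [h1, h2, h3, stepGood, PySem.Dict.modify, PySem.Dict.contains, PySem.Dict.insert, PySem.Dict.getD, PySem.Dict.get?, ih, List.count_cons]; omega
        · by_cases h4 : h = 'C'
          · simp [h1, h2, h3, h4, stepGood, PySem.Dict.modify, PySem.Dict.contains, PySem.Dict.insert, PySem.Dict.getD, PySem.Dict.get?, ih, List.count_cons]; omega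
          · simp [h1, h2, h3, h4, stepGood, ih, List.count_cons]

theorem evil_loop (l : List Char) (a b : Int) :
    l.foldl stepEvil (PySem.Dict.mk [("python", a), ("squirrel", b)]) =
      PySem.Dict.mk [("python", a + l.count 'p' + 2 * l.count 'P'),
                     ("squirrel", b + l.count 's' + 2 * l.count 'S')] := by
  induction l generalizing a b with
  | nil => simp
  | cons h t ih =>
    by_cases h1 : h = 'p'
    · simp [h1, stepEvil, PySem.Dict.modify, PySem.Dict.contains, PySem.Dict.insert, PySem.Dict.getD, PySem.Dict.get?, ih, List.count_cons]; omega
    · by_cases h2 : h = 'P'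
      · simp [h1, h2, stepEvil, PySem.Dict.modify, PySem.Dict.contains, PySem.Dict.insert, PySem.Dict.getD, PySem.Dict.get?, ih, List.count_cons]; omega
      · by_cases h3 : h = 's'
        · simp [h1, h2, h3, stepEvil, PySem.Dict.modify, PySem.Dict.contains, PySem.Dict.insert, PySem.Dict.getD, PySem.Dict.get?, ih, List.count_cons]; omega
        · by_cases h4 : h = 'S'
          · simp [h1, h2, h3, h4, stepEvil, PySem.Dict.modify, PySem.Dict.contains, PySem.Dict.insert, PySem.Dict.getD, PySem.Dict.get?, ih, List.count_cons]; omega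
          · simp [h1, h2, h3, h4, stepEvil, ih, List.count_cons]

-- ===== VERDICT (by name: the statement is the Claim_ definition above) =====
theorem diamonds_and_toads_spec : Claim_equal_diamonds_and_toads := by
  intro sentence fairy _
  unfold Spec_diamonds_and_toads diamonds_and_toads diamonds_and_toads_alt
  by_cases hf : fairy = "good"
  · have h0 : PySem.Dict.ofList [("ruby", (0 : Int)), ("crystal", 0)] =
        PySem.Dict.mk [("ruby", 0), ("crystal", 0)] := by decide
    simp only [hf, h0, beq_self_eq_true, if_true, good_loop]
    simp [PySem.Dict.items, count_single]
  · by_cases he : fairy = "evil"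
    · have h0 : PySem.Dict.ofList [("python", (0 : Int)), ("squirrel", 0)] =
          PySem.Dict.mk [("python", 0), ("squirrel", 0)] := by decide
      simp only [he, beq_self_eq_true, if_true, h0, evil_loop]
      simp [hf, PySem.Dict.items, count_single]
    · simp [hf, he]
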